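-- pv_equiv track=rewrite | github.com/pwmcclung/codeWars2 | sString.py | uncensor
-- ===== SOURCE A (Python) =====
-- def uncensor(infected, discovered):
--     sent = ""
--     for element in infected:
--         if element == "*":
--             sent += discovered[0]
--             discovered = discovered[1:]
--         else:
--             sent += element
--     return sent
-- ===== SOURCE B (Python) =====
-- def uncensor(infected, discovered):
--     parts = infected.split("*")
--     pieces = [parts[0]]
--     for d, p in zip(discovered, parts[1:]):
--         pieces.append(d)
--         pieces.append(p)
--     return "".join(pieces)
-- ===== Notes on version B (the rewrite author's own statement) =====
-- stated objective: faster
-- what changed: Replaces A's char-by-char scan that re-slices discovered at every '*' (and grows the result by string +=) with one split('*'), one interleaving pass over zip(discovered, parts[1:]) and a single ''.join.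
import Mathlib
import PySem

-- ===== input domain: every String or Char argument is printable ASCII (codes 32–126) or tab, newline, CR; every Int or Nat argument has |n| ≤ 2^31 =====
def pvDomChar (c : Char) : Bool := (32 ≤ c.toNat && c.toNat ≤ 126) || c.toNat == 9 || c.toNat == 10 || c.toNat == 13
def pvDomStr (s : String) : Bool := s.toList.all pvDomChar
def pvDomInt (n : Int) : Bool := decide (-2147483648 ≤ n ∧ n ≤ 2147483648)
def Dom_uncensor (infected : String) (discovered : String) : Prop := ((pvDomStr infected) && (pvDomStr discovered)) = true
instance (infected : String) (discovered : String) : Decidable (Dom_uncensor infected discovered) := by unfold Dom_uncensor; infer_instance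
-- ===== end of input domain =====

-- B replaces A's char-by-char scan (with repeated slicing of discovered) by split('*') + one
-- interleaving pass over zip(discovered, parts[1:]) joined at the end (objective: faster, measured).

-- ===== PORT A =====
-- the for-loop of A: state is (remaining infected chars, current discovered, sent accumulator);
-- discovered[0] is List.pyGet? (none = IndexError, outside Pre_), discovered[1:] is List.slice.
def uncA : List Char → List Char → List Char → List Char
  | [], _, sent => sent
  | c :: rest, disc, sent =>
    if c = '*' then
      match PySem.List.pyGet? disc (0 : Int) with
      | none => sent          -- IndexError in Python: input excluded by Pre_
      | some d => uncA rest (PySem.List.slice disc (some 1) none) (sent ++ [d])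
    else uncA rest disc (sent ++ [c])

def uncensor (infected : String) (discovered : String) : String :=
  String.ofList (uncA infected.toList discovered.toList [])

-- ===== PORT B =====
def uncensor_alt (infected : String) (discovered : String) : String :=
  let parts := PySem.Chars.splitOn infected.toList ['*']
  match parts with
  | [] => ""                  -- unreachable: split never returns an empty list (parts[0] is safe)
  | p0 :: rest =>
    let pieces := (List.zip discovered.toList rest).foldl
      (fun acc dp => acc ++ [[dp.1], dp.2]) [p0]
    String.ofList (PySem.Chars.join [] pieces)

-- ===== PRECONDITION & SPEC =====
-- Pre_ excludes exactly the inputs where A raises IndexError: more '*' than discovered chars.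
def Pre_uncensor (infected : String) (discovered : String) : Prop :=
  infected.toList.count '*' ≤ discovered.toList.length
instance (infected : String) (discovered : String) : Decidable (Pre_uncensor infected discovered) := by unfold Pre_uncensor; infer_instance

def pvWitness_uncensor : String × String := ("a*c*", "bd")

def Spec_uncensor (infected : String) (discovered : String) (out : String) : Prop := out = uncensor_alt infected discovered
instance (infected : String) (discovered : String) (out : String) : Decidable (Spec_uncensor infected discovered out) := by unfold Spec_uncensor; infer_instance

-- ===== CLAIM (what is proved, stated in full; the proofs are below) =====
def Claim_equal_uncensor : Prop := ∀ (infected : String) (discovered : String), Dom_uncensor infected discovered → Pre_uncensor infected discovered → Spec_uncensor infected discovered (uncensor infected discovered)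

-- ===== LEMMAS AND PROOFS =====

-- clean split on '*' with an explicit current-part accumulator
def msp : List Char → List Char → List (List Char)
  | pre, [] => [pre]
  | pre, c :: r => if c = '*' then pre :: msp [] r else msp (pre ++ [c]) r

-- interleave: one discovered char before each later part (truncating, like zip)
def wv : List (List Char) → List Char → List Char
  | [], _ => []
  | _ :: _, [] => []
  | p :: ps, d :: ds => d :: (p ++ wv ps ds)

lemma go_eq_msp (l : List Char) : ∀ (fuel : Nat) (cur : List Char) (acc : List (List Char)),
    l.length < fuel →
    PySem.Chars.splitOn.go ['*'] fuel l cur acc = acc.reverse ++ msp cur.reverse l := by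
  induction l with
  | nil =>
    intro fuel cur acc h
    match fuel with
    | fuel + 1 => simp [PySem.Chars.splitOn.go, msp]
  | cons c rest ih =>
    intro fuel cur acc h
    match fuel with
    | fuel + 1 =>
      by_cases hc : c = '*'
      · subst hc
        rw [show PySem.Chars.splitOn.go ['*'] (fuel+1) ('*' :: rest) cur acc
              = PySem.Chars.splitOn.go ['*'] fuel rest [] (cur.reverse :: acc) by
            simp [PySem.Chars.splitOn.go, List.isPrefixOf]]
        rw [ih fuel [] (cur.reverse :: acc) (by simpa using h)]
        simp [msp]
      · rw [show PySem.Chars.splitOn.go ['*'] (fuel+1) (c :: rest) cur acc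
              = PySem.Chars.splitOn.go ['*'] fuel rest (c :: cur) acc by
            simp [PySem.Chars.splitOn.go, List.isPrefixOf]
            intro h'; exact absurd h'.symm hc]
        rw [ih fuel (c :: cur) acc (by simpa using h)]
        simp [msp, hc]

lemma msp_ne_nil (l pre : List Char) : msp pre l ≠ [] := by
  cases l with
  | nil => simp [msp]
  | cons c r =>
    by_cases hc : c = '*' <;> simp [msp, hc]
    exact msp_ne_nil r (pre ++ [c])

lemma msp_pre (l : List Char) : ∀ pre : List Char,
    msp pre l = (pre ++ (msp [] l).headI) :: (msp [] l).tail := by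
  induction l with
  | nil => intro pre; simp [msp]
  | cons c r ih =>
    intro pre
    by_cases hc : c = '*'
    · subst hc; simp [msp]
    · simp only [msp, if_neg hc, List.nil_append]
      rw [ih (pre ++ [c]), ih [c]]
      simp

lemma uncA_weave (l : List Char) : ∀ (disc sent : List Char),
    l.count '*' ≤ disc.length →
    uncA l disc sent = sent ++ (msp [] l).headI ++ wv (msp [] l).tail disc := by
  induction l with
  | nil => intro disc sent _; simp [uncA, msp, wv]
  | cons c r ih =>
    intro disc sent h
    by_cases hc : c = '*'
    · subst hc
      have hcount : r.count '*' + 1 ≤ disc.length := by simpa [List.count_cons] using h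
      match disc with
      | d :: ds =>
        have hds : r.count '*' ≤ ds.length := by simpa using hcount
        rw [show uncA ('*' :: r) (d :: ds) sent = uncA r ds (sent ++ [d]) by
          simp [uncA, PySem.List.pyGet?, PySem.List.pyIdx?, PySem.List.slice]]
        rw [ih ds (sent ++ [d]) hds]
        obtain ⟨p, ps, hp⟩ : ∃ p ps, msp ([] : List Char) r = p :: ps := by
          cases hmr : msp ([] : List Char) r with
          | nil => exact absurd hmr (msp_ne_nil r [])
          | cons p ps => exact ⟨p, ps, rfl⟩
        simp [msp, hp, wv]
    · have hcount : r.count '*' ≤ disc.length := by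
        simp only [List.count_cons, beq_iff_eq] at h; omega
      rw [show uncA (c :: r) disc sent = uncA r disc (sent ++ [c]) by simp [uncA, hc]]
      rw [ih disc (sent ++ [c]) hcount]
      obtain ⟨p, ps, hp⟩ : ∃ p ps, msp ([] : List Char) r = p :: ps := by
        cases hmr : msp ([] : List Char) r with
        | nil => exact absurd hmr (msp_ne_nil r [])
        | cons p ps => exact ⟨p, ps, rfl⟩
      simp only [msp, if_neg hc, List.nil_append]
      rw [msp_pre r [c], hp]
      simp

lemma foldl_pieces (zs : List (Char × List Char)) : ∀ (acc : List (List Char)),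
    (zs.foldl (fun acc dp => acc ++ [[dp.1], dp.2]) acc) = acc ++ zs.flatMap (fun dp => [[dp.1], dp.2]) := by
  induction zs with
  | nil => intro acc; simp
  | cons z zs ih => intro acc; simp [List.foldl_cons, ih]

lemma flatten_zip (ps : List (List Char)) : ∀ (disc : List Char),
    ((List.zip disc ps).flatMap (fun dp => [[dp.1], dp.2])).flatten = wv ps disc := by
  induction ps with
  | nil => intro disc; cases disc <;> simp [wv]
  | cons p ps ih =>
    intro disc
    cases disc with
    | nil => simp [wv]
    | cons d ds => simp [wv, ih ds]

lemma join_flatten (ps : List (List Char)) : PySem.Chars.join [] ps = ps.flatten := by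
  simp [PySem.Chars.join, List.intercalate]
  induction ps with
  | nil => simp
  | cons p qs ih => cases qs <;> simp_all [List.intersperse]

lemma splitOn_eq_msp (l : List Char) : PySem.Chars.splitOn l ['*'] = msp [] l := by
  rw [show PySem.Chars.splitOn l ['*'] = PySem.Chars.splitOn.go ['*'] (l.length + 1) l [] [] from rfl]
  rw [go_eq_msp l (l.length + 1) [] [] (Nat.lt_succ_self _)]
  simp

-- ===== VERDICT (by name: the statement is the Claim_ definition above) =====
theorem uncensor_spec : Claim_equal_uncensor := by
  intro infected discovered _ hpre
  unfold Spec_uncensor uncensor uncensor_alt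
  rw [splitOn_eq_msp]
  obtain ⟨p, ps, hp⟩ : ∃ p ps, msp ([] : List Char) infected.toList = p :: ps := by
    cases hmr : msp ([] : List Char) infected.toList with
    | nil => exact absurd hmr (msp_ne_nil _ [])
    | cons p ps => exact ⟨p, ps, rfl⟩
  rw [uncA_weave infected.toList discovered.toList [] hpre]
  simp only [hp, foldl_pieces, List.flatten_append, join_flatten]
  simp [flatten_zip]
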